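-- pv_equiv track=rewrite | github.com/Shraddhasaini/Geektrust | geektrust.py | check
-- ===== SOURCE A (Python) =====
-- def decrypt(cipher,key):
--     if cipher.islower():
--         return chr((ord(cipher)-key-97)%26+97)
--     else:
--         return chr((ord(cipher)-key-65)%26+65)
--
-- def check(animal,message):
--     animal_dict = {}
--     message_dict = {}
--     for i in animal:
--         animal_dict[i] = animal_dict.get(i, 0) + 1
--     for i in list(message):
--         c = decrypt(i, len(animal))
--         message_dict[c] = message_dict.get(c, 0)+1
--
--     return not any([max(j-message_dict.get(i,0), 0) for i, j in animal_dict.items()])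
-- ===== SOURCE B (Python) =====
-- def decrypt(cipher, key):
--     if cipher.islower():
--         return chr((ord(cipher)-key-97)%26+97)
--     else:
--         return chr((ord(cipher)-key-65)%26+65)
--
-- def check(animal, message):
--     # sort-and-merge: animal's letters form a multiset-subset of the decrypted
--     # message iff sorted(animal) is a (greedy) subsequence of the sorted decryption
--     need = sorted(animal)
--     have = sorted(decrypt(c, len(animal)) for c in message)
--     i = 0
--     for c in have:
--         if i < len(need) and need[i] == c:
--             i += 1
--     return i == len(need)
-- ===== Notes on version B (the rewrite author's own statement) =====
-- stated objective: alternative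
-- what changed: Replaces A's two frequency dictionaries and per-key surplus comparison with a sort-and-merge algorithm: sort animal's letters and the decrypted message's letters, then one greedy merge pass checks that the sorted animal is a subsequence of the sorted message.
import Mathlib
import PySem

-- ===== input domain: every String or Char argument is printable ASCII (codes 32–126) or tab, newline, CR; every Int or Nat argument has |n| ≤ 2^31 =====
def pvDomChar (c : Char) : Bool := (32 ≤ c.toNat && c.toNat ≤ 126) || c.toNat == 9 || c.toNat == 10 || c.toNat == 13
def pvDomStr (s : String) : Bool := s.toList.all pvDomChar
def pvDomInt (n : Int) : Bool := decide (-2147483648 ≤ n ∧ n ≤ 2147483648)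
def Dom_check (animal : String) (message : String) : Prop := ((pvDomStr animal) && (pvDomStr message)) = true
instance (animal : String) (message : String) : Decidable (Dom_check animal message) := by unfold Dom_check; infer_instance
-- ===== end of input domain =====

-- B replaces A's two frequency dictionaries + per-key surplus comparison by sort-and-merge:
-- sorted(animal) must be a greedy subsequence of the sorted decrypted message (objective: alternative).

-- ===== PORT A =====
-- port of decrypt (shared helper of the module; used by both A and B)
def pvDecrypt (cipher : Char) (key : Int) : Char :=
  if PySem.Chars.islower cipher then
    Char.ofNat ((PySem.Int.mod ((cipher.toNat : Int) - key - 97) 26 + 97).toNat)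
  else
    Char.ofNat ((PySem.Int.mod ((cipher.toNat : Int) - key - 65) 26 + 65).toNat)

def check (animal : String) (message : String) : Bool :=
  let animalDict : PySem.Dict Char Int :=
    animal.toList.foldl (fun d i => d.insert i (d.getD i 0 + 1)) PySem.Dict.empty
  let messageDict : PySem.Dict Char Int :=
    message.toList.foldl (fun d i =>
      let c := pvDecrypt i (PySem.Str.len animal)
      d.insert c (d.getD c 0 + 1)) PySem.Dict.empty
  !((animalDict.items.map (fun p => max (p.2 - messageDict.getD p.1 0) 0)).any (fun x => x != 0))

-- ===== PORT B =====
def check_alt (animal : String) (message : String) : Bool :=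
  let need : List Char := PySem.List.sorted animal.toList (fun x => x) false
  let haveS : List Char :=
    PySem.List.sorted (message.toList.map (fun c => pvDecrypt c (PySem.Str.len animal))) (fun x => x) false
  -- 'i < len(need) and need[i] == c' : need[i]? is some exactly when i < len(need)
  let i := haveS.foldl (fun i c =>
    match need[i]? with
    | some r => if r == c then i + 1 else i
    | none => i) 0
  i == need.length

-- ===== PRECONDITION & SPEC =====
def Spec_check (animal : String) (message : String) (out : Bool) : Prop := out = check_alt animal message
instance (animal : String) (message : String) (out : Bool) : Decidable (Spec_check animal message out) := by unfold Spec_check; infer_instance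

-- ===== CLAIM (what is proved, stated in full; the proofs are below) =====
def Claim_equal_check : Prop := ∀ (animal : String) (message : String), Dom_check animal message → Spec_check animal message (check animal message)

-- ===== LEMMAS AND PROOFS =====

-- B's merge step, named for the proofs
def pvStep (need : List Char) (c : Char) : List Char :=
  match need with
  | [] => []
  | r :: rs => if r == c then rs else r :: rs

-- the index step of B's port, named for the proofs
def pvStepIdx (need : List Char) (i : Nat) (c : Char) : Nat :=
  match need[i]? with
  | some r => if r == c then i + 1 else i
  | none => i

theorem pvFold_nil (hs : List Char) : hs.foldl pvStep [] = [] := by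
  induction hs with
  | nil => rfl
  | cons c t ih => simpa [pvStep] using ih

-- the greedy merge empties 'need' exactly when need is a subsequence of hs (greedy subsequence check)
theorem pvFold_empty_iff_isSublist (hs need : List Char) :
    (hs.foldl pvStep need = []) ↔ need.isSublist hs = true := by
  induction hs generalizing need with
  | nil => cases need <;> simp [List.isSublist]
  | cons c t ih =>
    cases need with
    | nil => simp [pvStep, pvFold_nil, List.isSublist]
    | cons r rs =>
      by_cases h : r == c
      · simp [pvStep, h, List.isSublist, ih]
      · simp [pvStep, h, List.isSublist, ih]

-- the index-pointer fold is the drop-suffix view of the list-consuming fold pvStep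
theorem pvFoldIdx_eq (hs : List Char) (need : List Char) (i : Nat) (h : i ≤ need.length) :
    hs.foldl (pvStepIdx need) i = need.length - (hs.foldl pvStep (need.drop i)).length := by
  induction hs generalizing i with
  | nil =>
    simp [List.length_drop]
    omega
  | cons c t ih =>
    simp only [List.foldl_cons]
    by_cases hlt : i < need.length
    · have hget : need[i]? = some need[i] := List.getElem?_eq_getElem hlt
      have hdrop : need.drop i = need[i] :: need.drop (i + 1) := List.drop_eq_getElem_cons hlt
      by_cases hc : need[i] == c
      · rw [show pvStepIdx need i c = i + 1 from by simp [pvStepIdx, hget, hc],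
            hdrop, show pvStep (need[i] :: need.drop (i + 1)) c = need.drop (i + 1) from by
              simp [pvStep, hc]]
        exact ih (i + 1) hlt
      · rw [show pvStepIdx need i c = i from by simp [pvStepIdx, hget, hc],
            hdrop, show pvStep (need[i] :: need.drop (i + 1)) c = need[i] :: need.drop (i + 1) from by
              simp [pvStep, hc], ← hdrop]
        exact ih i h
    · have hi : i = need.length := by omega
      have hget : need[i]? = none := by simp [hi]
      rw [show pvStepIdx need i c = i from by simp [pvStepIdx, hget]]
      have hdi : need.drop i = [] := by simp [hi]
      have hrec := ih i h
      rw [hdi, pvFold_nil] at hrec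
      rw [hdi]
      simpa [pvStep, pvFold_nil] using hrec

theorem pvFold_length_le (hs : List Char) (l : List Char) :
    (hs.foldl pvStep l).length ≤ l.length := by
  induction hs generalizing l with
  | nil => exact le_rfl
  | cons c t ih =>
    refine le_trans (ih (pvStep l c)) ?_
    cases l with
    | nil => simp [pvStep]
    | cons r rs => by_cases hc : r == c <;> simp [pvStep, hc]

-- A = true iff animal's letters are a multiset-subset of the decrypted message's letters
theorem check_true_iff (animal message : String) :
    check animal message = true ↔
      List.Subperm animal.toList (message.toList.map (fun c => pvDecrypt c (PySem.Str.len animal))) := by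
  simp only [check]
  rw [PySem.Dict.foldl_insert_getD_add_one_eq_counter]
  rw [show message.toList.foldl
        (fun d i => d.insert (pvDecrypt i (PySem.Str.len animal)) (d.getD (pvDecrypt i (PySem.Str.len animal)) 0 + 1))
        PySem.Dict.empty
      = PySem.Dict.counter (message.toList.map (fun i => pvDecrypt i (PySem.Str.len animal))) from by
    rw [← PySem.Dict.foldl_insert_getD_add_one_eq_counter, List.foldl_map]]
  rw [List.subperm_ext_iff]
  rw [PySem.Dict.items_counter]
  simp only [List.map_map, List.any_map, Bool.not_eq_eq_eq_not, Bool.not_true,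
    List.any_eq_false, Function.comp_apply, bne_iff_ne, ne_eq, not_not]
  constructor
  · intro h x hx
    have := h x (by simpa [PySem.Set.mem_ofList] using hx)
    rw [PySem.Dict.getD_counter] at this
    omega
  · intro h k hk
    have hk' : k ∈ animal.toList := by simpa [PySem.Set.mem_ofList] using hk
    have := h k hk'
    rw [PySem.Dict.getD_counter]
    omega

-- B = true iff the same multiset-subset relation holds
theorem check_alt_true_iff (animal message : String) :
    check_alt animal message = true ↔
      List.Subperm animal.toList (message.toList.map (fun c => pvDecrypt c (PySem.Str.len animal))) := by
  simp only [check_alt]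
  set need := PySem.List.sorted animal.toList (fun x => x) false with hneed
  set haveS := PySem.List.sorted (message.toList.map (fun c => pvDecrypt c (PySem.Str.len animal))) (fun x => x) false with hhaveS
  rw [show (fun (i : Nat) (c : Char) =>
        match need[i]? with
        | some r => if r == c then i + 1 else i
        | none => i) = pvStepIdx need from rfl]
  rw [pvFoldIdx_eq haveS need 0 (Nat.zero_le _)]
  simp only [List.drop_zero, beq_iff_eq]
  have hle := pvFold_length_le haveS need
  rw [show (need.length - (haveS.foldl pvStep need).length = need.length) ↔
        (haveS.foldl pvStep need = []) from by
      constructor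
      · intro h; rw [← List.length_eq_zero_iff]; omega
      · intro h; rw [h]; simp]
  rw [pvFold_empty_iff_isSublist, List.isSublist_iff_sublist]
  set al := animal.toList
  set ml := message.toList.map (fun c => pvDecrypt c (PySem.Str.len animal))
  have hpa : (PySem.List.sorted al (fun x => x) false).Perm al := PySem.List.sorted_perm al _ _
  have hpm : (PySem.List.sorted ml (fun x => x) false).Perm ml := PySem.List.sorted_perm ml _ _
  constructor
  · intro h
    exact hpa.symm.subperm.trans (h.subperm.trans hpm.subperm)
  · intro h
    have hsub : List.Subperm (PySem.List.sorted al (fun x => x) false) (PySem.List.sorted ml (fun x => x) false) :=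
      (hpa.subperm.trans h).trans hpm.symm.subperm
    have hsa : (PySem.List.sorted al (fun x => x) false).Pairwise (· ≤ ·) := by
      simpa using PySem.List.sorted_pairwise al (fun x => x)
    have hsm : (PySem.List.sorted ml (fun x => x) false).Pairwise (· ≤ ·) := by
      simpa using PySem.List.sorted_pairwise ml (fun x => x)
    exact List.sublist_of_subperm_of_pairwise hsub hsa hsm

-- ===== VERDICT (by name: the statement is the Claim_ definition above) =====
theorem check_spec : Claim_equal_check := by
  intro animal message _
  unfold Spec_check
  rw [Bool.eq_iff_iff, check_true_iff, check_alt_true_iff]
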